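-- pv_equiv track=rewrite | github.com/tiendm1991/python | leetcode/number-of-ways-to-paint-n-3-grid.py | numOfWays
-- ===== SOURCE A (Python) =====
-- def numOfWays(n: int) -> int:
--     mod = 10**9 + 7
--     if n == 1:
--         return 12
--     if n == 2:
--         return 54
--     preResult = 54
--     two = 30
--     three = 24
--     step = 2
--     while step < n:
--         two = (two * 3 + three * 2) % mod # two = twoPre * 3 + threePre * 2
--         three = (preResult * 2) % mod # three = twoPre * 2 + threePre * 2 = preResult * 2
--         preResult = (two + three) % mod # update current result of step, result at step = preResult
--         step += 1
--     return preResult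
-- ===== SOURCE B (Python) =====
-- def numOfWays(n: int) -> int:
--     MOD = 10**9 + 7
--     if n == 1:
--         return 12
--     def mul(A, B):
--         (a, b, c, d), (e, f, g, h) = A, B
--         return ((a * e + b * g) % MOD, (a * f + b * h) % MOD,
--                 (c * e + d * g) % MOD, (c * f + d * h) % MOD)
--     M = (3, 2, 2, 2)
--     R = (1, 0, 0, 1)
--     e = max(n - 2, 0)
--     while e:
--         if e & 1:
--             R = mul(R, M)
--         M = mul(M, M)
--         e >>= 1
--     a, b, c, d = R
--     x = (a * 30 + b * 24) % MOD
--     y = (c * 30 + d * 24) % MOD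
--     return (x + y) % MOD
-- ===== Notes on version B (the rewrite author's own statement) =====
-- stated objective: faster
-- what changed: Replaces A's O(n) linear iteration of the (two,three) recurrence with binary exponentiation of the 2x2 transition matrix [[3,2],[2,2]] applied to the initial vector (30,24).
import Mathlib
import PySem

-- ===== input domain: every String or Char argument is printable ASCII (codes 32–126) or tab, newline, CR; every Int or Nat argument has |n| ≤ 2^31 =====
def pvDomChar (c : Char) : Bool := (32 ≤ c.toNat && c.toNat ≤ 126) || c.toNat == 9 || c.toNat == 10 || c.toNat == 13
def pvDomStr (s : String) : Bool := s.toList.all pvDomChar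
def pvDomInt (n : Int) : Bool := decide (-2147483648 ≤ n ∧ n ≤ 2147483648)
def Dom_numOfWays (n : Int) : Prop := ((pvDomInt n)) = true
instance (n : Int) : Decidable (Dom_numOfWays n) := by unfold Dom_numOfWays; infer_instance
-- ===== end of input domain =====

-- B replaces A's O(n) linear recurrence loop by binary exponentiation of the 2x2
-- transition matrix [[3,2],[2,2]] applied to the initial vector (30,24); objective: faster.

-- ===== PORT A =====
-- A's while loop, counted by the number of remaining iterations (n - step).
def numOfWaysLoop : Nat → Int → Int → Int → Int
  | 0, preResult, _, _ => preResult
  | k + 1, preResult, two, three =>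
    let two' := (two * 3 + three * 2) % 1000000007
    let three' := (preResult * 2) % 1000000007
    numOfWaysLoop k ((two' + three') % 1000000007) two' three'

def numOfWays (n : Int) : Int :=
  if n = 1 then 12
  else if n = 2 then 54
  else numOfWaysLoop (n - 2).toNat 54 30 24

-- ===== PORT B =====
-- 2x2 integer matrix as a quadruple (row-major), multiplied mod 10^9+7.
def bMul (A B : Int × Int × Int × Int) : Int × Int × Int × Int :=
  ((A.1 * B.1 + A.2.1 * B.2.2.1) % 1000000007,
   (A.1 * B.2.1 + A.2.1 * B.2.2.2) % 1000000007,
   (A.2.2.1 * B.1 + A.2.2.2 * B.2.2.1) % 1000000007,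
   (A.2.2.1 * B.2.1 + A.2.2.2 * B.2.2.2) % 1000000007)

-- the 'while e:' binary-exponentiation loop of Source B
def bPowLoop (e : Nat) (M R : Int × Int × Int × Int) : Int × Int × Int × Int :=
  if e = 0 then R
  else bPowLoop (e / 2) (bMul M M) (if e % 2 = 1 then bMul R M else R)
decreasing_by exact Nat.div_lt_self (Nat.pos_of_ne_zero (by assumption)) (by omega)

def numOfWays_alt (n : Int) : Int :=
  if n = 1 then 12
  else
    let R := bPowLoop (max (n - 2) 0).toNat (3, 2, 2, 2) (1, 0, 0, 1)
    let x := (R.1 * 30 + R.2.1 * 24) % 1000000007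
    let y := (R.2.2.1 * 30 + R.2.2.2 * 24) % 1000000007
    (x + y) % 1000000007

-- ===== PRECONDITION & SPEC =====
def Spec_numOfWays (n : Int) (out : Int) : Prop := out = numOfWays_alt n
instance (n : Int) (out : Int) : Decidable (Spec_numOfWays n out) := by unfold Spec_numOfWays; infer_instance

-- ===== CLAIM (what is proved, stated in full; the proofs are below) =====
def Claim_equal_numOfWays : Prop := ∀ (n : Int), Dom_numOfWays n → Spec_numOfWays n (numOfWays n)

-- ===== LEMMAS AND PROOFS =====

-- the modulus as a Nat, and the cast of a quadruple into a Matrix over ZMod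
def pvP : Nat := 1000000007

def pvPhi (A : Int × Int × Int × Int) : Matrix (Fin 2) (Fin 2) (ZMod pvP) :=
  !![(A.1 : ZMod pvP), (A.2.1 : ZMod pvP); (A.2.2.1 : ZMod pvP), (A.2.2.2 : ZMod pvP)]

-- the linear step of A's loop, over ZMod
def pvF (v : ZMod pvP × ZMod pvP) : ZMod pvP × ZMod pvP :=
  (3 * v.1 + 2 * v.2, 2 * v.1 + 2 * v.2)

-- action of a matrix on a pair
def pvAct (A : Matrix (Fin 2) (Fin 2) (ZMod pvP)) (v : ZMod pvP × ZMod pvP) : ZMod pvP × ZMod pvP :=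
  (A 0 0 * v.1 + A 0 1 * v.2, A 1 0 * v.1 + A 1 1 * v.2)

-- cast of a mod-reduced Int into ZMod pvP drops the reduction
theorem pvCastMod (x : Int) : ((x % 1000000007 : Int) : ZMod pvP) = (x : ZMod pvP) := by
  have h : ((1000000007 : Int)) = ((pvP : Nat) : Int) := by norm_num [pvP]
  rw [h, ZMod.intCast_mod]

theorem pvPhi_mul (A B : Int × Int × Int × Int) : pvPhi (bMul A B) = pvPhi A * pvPhi B := by
  rw [pvPhi, pvPhi, pvPhi, Matrix.mul_fin_two]
  simp only [bMul, pvCastMod]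
  push_cast
  rfl

theorem pvPowLoop (e : Nat) (M R : Int × Int × Int × Int) :
    pvPhi (bPowLoop e M R) = pvPhi R * pvPhi M ^ e := by
  induction e using Nat.strong_induction_on generalizing M R with
  | _ e ih =>
    rw [bPowLoop]
    by_cases h : e = 0
    · simp [h]
    · have hlt : e / 2 < e := Nat.div_lt_self (Nat.pos_of_ne_zero h) (by omega)
      rw [if_neg h, ih _ hlt]
      have key : ∀ a : Nat, a = e % 2 + 2 * (e / 2) → pvPhi M ^ a
          = pvPhi M ^ (e % 2) * pvPhi (bMul M M) ^ (e / 2) := by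
        intro a ha
        rw [ha, pow_add, pvPhi_mul, ← sq, ← pow_mul]
      have he : e = e % 2 + 2 * (e / 2) := by omega
      by_cases h2 : e % 2 = 1
      · rw [if_pos h2, pvPhi_mul, mul_assoc]
        congr 1
        rw [key e he, h2, pow_one]
      · rw [if_neg h2]
        congr 1
        have h0 : e % 2 = 0 := by omega
        rw [key e he, h0, pow_zero, one_mul]

theorem pvAct_mul (A B : Matrix (Fin 2) (Fin 2) (ZMod pvP)) (v : ZMod pvP × ZMod pvP) :
    pvAct (A * B) v = pvAct A (pvAct B v) := by
  simp only [pvAct, Matrix.mul_apply, Fin.sum_univ_two, Prod.mk.injEq]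
  constructor <;> ring

theorem pvAct_M (v : ZMod pvP × ZMod pvP) : pvAct (pvPhi (3, 2, 2, 2)) v = pvF v := by
  simp only [pvAct, pvPhi, pvF, Prod.mk.injEq, Matrix.cons_val', Matrix.cons_val_zero,
    Matrix.cons_val_one, Matrix.of_apply]
  constructor <;> push_cast <;> ring

theorem pvAct_pow (k : Nat) (v : ZMod pvP × ZMod pvP) :
    pvAct (pvPhi (3, 2, 2, 2) ^ k) v = pvF^[k] v := by
  induction k generalizing v with
  | zero => simp [pvAct]
  | succ k ih =>
    rw [Function.iterate_succ_apply', pow_succ', pvAct_mul, ih, pvAct_M]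

-- A's loop, cast into ZMod: it iterates pvF and returns the sum of the components
theorem pvLoop_cast (k : Nat) (pre two three : Int)
    (h : (pre : ZMod pvP) = (two : ZMod pvP) + (three : ZMod pvP)) :
    ((numOfWaysLoop k pre two three : Int) : ZMod pvP)
      = (pvF^[k] ((two : ZMod pvP), (three : ZMod pvP))).1
        + (pvF^[k] ((two : ZMod pvP), (three : ZMod pvP))).2 := by
  induction k generalizing pre two three with
  | zero => simpa [numOfWaysLoop] using h
  | succ k ih =>
    rw [numOfWaysLoop]
    have h2 : (((two * 3 + three * 2) % 1000000007 : Int) : ZMod pvP)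
        = (pvF ((two : ZMod pvP), (three : ZMod pvP))).1 := by
      rw [pvCastMod]; push_cast [pvF]; ring
    have h3 : (((pre * 2) % 1000000007 : Int) : ZMod pvP)
        = (pvF ((two : ZMod pvP), (three : ZMod pvP))).2 := by
      rw [pvCastMod]; push_cast [pvF]; rw [h]; ring
    have hpre : ((((two * 3 + three * 2) % 1000000007 + (pre * 2) % 1000000007)
          % 1000000007 : Int) : ZMod pvP)
        = (((two * 3 + three * 2) % 1000000007 : Int) : ZMod pvP)
          + (((pre * 2) % 1000000007 : Int) : ZMod pvP) := by
      rw [pvCastMod]; push_cast; ring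
    rw [ih _ _ _ hpre]
    have hpair : ((((two * 3 + three * 2) % 1000000007 : Int) : ZMod pvP),
        (((pre * 2) % 1000000007 : Int) : ZMod pvP))
        = pvF ((two : ZMod pvP), (three : ZMod pvP)) := by
      rw [Prod.ext_iff]; exact ⟨h2, h3⟩
    rw [hpair, ← Function.iterate_succ_apply]

-- range of A's loop result
theorem pvLoop_range (k : Nat) (pre two three : Int) (h : 0 ≤ pre ∧ pre < 1000000007) :
    0 ≤ numOfWaysLoop k pre two three ∧ numOfWaysLoop k pre two three < 1000000007 := by
  induction k generalizing pre two three with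
  | zero => simpa [numOfWaysLoop] using h
  | succ k ih =>
    rw [numOfWaysLoop]
    exact ih _ _ _ ⟨Int.emod_nonneg _ (by norm_num), Int.emod_lt_of_pos _ (by norm_num)⟩

-- ===== VERDICT (by name: the statement is the Claim_ definition above) =====
theorem numOfWays_spec : Claim_equal_numOfWays := by
  intro n _
  unfold Spec_numOfWays numOfWays numOfWays_alt
  by_cases h1 : n = 1
  · simp [h1]
  rw [if_neg h1, if_neg h1]
  by_cases hle : n ≤ 2
  · have hz : (n - 2).toNat = 0 := by omega
    have hz' : (max (n - 2) 0).toNat = 0 := by omega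
    rw [hz', bPowLoop]
    by_cases h2 : n = 2
    · rw [if_pos h2]; norm_num
    · rw [if_neg h2, hz]; norm_num [numOfWaysLoop]
  · have h2 : n ≠ 2 := by omega
    rw [if_neg h2]
    have hmx : (max (n - 2) 0).toNat = (n - 2).toNat := by omega
    rw [hmx]
    set k := (n - 2).toNat with hk
    have hk1 : 1 ≤ k := by omega
    -- both sides reduced mod p, equal in ZMod pvP ⇒ equal as Int
    have hA := pvLoop_range k 54 30 24 (by norm_num)
    have hBform : ∀ x : Int, 0 ≤ x % 1000000007 ∧ x % 1000000007 < 1000000007 :=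
      fun x => ⟨Int.emod_nonneg _ (by norm_num), Int.emod_lt_of_pos _ (by norm_num)⟩
    -- cast equality
    have hcast : ((numOfWaysLoop k 54 30 24 : Int) : ZMod pvP)
        = ((let R := bPowLoop k (3, 2, 2, 2) (1, 0, 0, 1)
            let x := (R.1 * 30 + R.2.1 * 24) % 1000000007
            let y := (R.2.2.1 * 30 + R.2.2.2 * 24) % 1000000007
            ((x + y) % 1000000007 : Int)) : ZMod pvP) := by
      rw [pvLoop_cast k 54 30 24 (by norm_num)]
      have hP : ((1000000007 : Int)) = ((pvP : Nat) : Int) := by norm_num [pvP]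
      set R := bPowLoop k (3, 2, 2, 2) (1, 0, 0, 1) with hR
      show _ = (((((R.1 * 30 + R.2.1 * 24) % 1000000007)
          + ((R.2.2.1 * 30 + R.2.2.2 * 24) % 1000000007)) % 1000000007 : Int) : ZMod pvP)
      rw [hP, ZMod.intCast_mod]
      push_cast
      have hpow : pvPhi R = pvPhi (3, 2, 2, 2) ^ k := by
        rw [hR, pvPowLoop]
        have hI : pvPhi ((1, 0, 0, 1) : Int × Int × Int × Int) = 1 := by
          simp [pvPhi]
          rw [← Matrix.one_fin_two]
        rw [hI, one_mul]
      have hact := pvAct_pow k ((30 : ZMod pvP), (24 : ZMod pvP))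
      rw [← hpow] at hact
      have h00 : pvPhi R 0 0 = ((R.1 : Int) : ZMod pvP) := by simp [pvPhi]
      have h01 : pvPhi R 0 1 = ((R.2.1 : Int) : ZMod pvP) := by simp [pvPhi]
      have h10 : pvPhi R 1 0 = ((R.2.2.1 : Int) : ZMod pvP) := by simp [pvPhi]
      have h11 : pvPhi R 1 1 = ((R.2.2.2 : Int) : ZMod pvP) := by simp [pvPhi]
      rw [Prod.ext_iff] at hact
      obtain ⟨ha1, ha2⟩ := hact
      simp only [pvAct, h00, h01, h10, h11] at ha1 ha2
      rw [← ha1, ← ha2]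
    have hp' : (pvP : Int) = 1000000007 := by norm_num [pvP]
    rw [ZMod.intCast_eq_intCast_iff'] at hcast
    simp only [hp'] at hcast
    rw [Int.emod_eq_of_lt hA.1 hA.2] at hcast
    rw [Int.emod_eq_of_lt (hBform _).1 (hBform _).2] at hcast
    exact hcast
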